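-- pv_equiv track=rewrite | github.com/kac460/advent-of-code-2023 | day-10/part_2_2.py | node_in_loop
-- ===== SOURCE A (Python) =====
-- _ROW_INDEX = 0
--
-- _COL_INDEX = 1
--
-- def node_in_loop(node: tuple[int, int], loop: set[tuple[int, int]]) -> bool:
--     max_r = max(v[_ROW_INDEX] for v in loop) + 1
--     max_c = max(v[_COL_INDEX] for v in loop) + 1
--     node_r, node_c = node
--     loop_upper_bound = False
--     for r in range(node_r):
--         if (r, node_c) in loop:
--             loop_upper_bound = True
--             break
--     if not loop_upper_bound:
--         return False
--
--     loop_lower_bound = False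
--     for r in range(node_r, max_r):
--         if (r, node_c) in loop:
--             loop_lower_bound = True
--             break
--     if not loop_lower_bound:
--         return False
--
--     loop_left_bound = False
--     for c in range(node_c):
--         if (node_r, c) in loop:
--             loop_left_bound = True
--             break
--     if not loop_left_bound:
--         return False
--
--     loop_right_bound = False
--     for c in range(node_c, max_c):
--         if (node_r, c) in loop:
--             loop_right_bound = True
--             break
--     return loop_right_bound
-- ===== SOURCE B (Python) =====
-- def node_in_loop(node, loop):
--     node_r, node_c = node
--     upper = lower = left = right = False
--     for r, c in loop:
--         if c == node_c:
--             if 0 <= r < node_r: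
--                 upper = True
--             if r >= node_r:
--                 lower = True
--         if r == node_r:
--             if 0 <= c < node_c:
--                 left = True
--             if c >= node_c:
--                 right = True
--     return upper and lower and left and right
-- ===== Notes on version B (the rewrite author's own statement) =====
-- stated objective: faster
-- what changed: Replaces A's four range scans of grid coordinates (each probing set membership up to max-coordinate times) with a single pass over the loop cells that records the four bounding flags directly.
import Mathlib
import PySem

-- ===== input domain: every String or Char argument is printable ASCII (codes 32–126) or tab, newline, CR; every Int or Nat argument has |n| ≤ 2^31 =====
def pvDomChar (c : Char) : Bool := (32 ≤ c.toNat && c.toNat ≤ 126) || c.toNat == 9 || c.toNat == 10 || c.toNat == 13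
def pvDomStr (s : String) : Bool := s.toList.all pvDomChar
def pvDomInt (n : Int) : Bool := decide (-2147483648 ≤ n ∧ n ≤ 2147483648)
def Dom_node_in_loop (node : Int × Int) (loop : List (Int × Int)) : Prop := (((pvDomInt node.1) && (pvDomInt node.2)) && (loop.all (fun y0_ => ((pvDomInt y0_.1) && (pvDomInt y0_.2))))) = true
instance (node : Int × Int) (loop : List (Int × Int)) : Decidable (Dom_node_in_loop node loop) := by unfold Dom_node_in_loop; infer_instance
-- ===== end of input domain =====

-- B replaces A's four coordinate-range scans with one pass over the loop cells (objective: faster).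

-- ===== PORT A =====
-- A scans ranges of coordinates and probes set membership, breaking at the first hit;
-- each 'for … break' scan is ported as List.any over the same pyRange.
def node_in_loop (node : Int × Int) (loop : List (Int × Int)) : Bool :=
  match PySem.List.max? (loop.map Prod.fst) (fun x => x),
        PySem.List.max? (loop.map Prod.snd) (fun x => x) with
  | some mr, some mc =>
    let max_r := mr + 1
    let max_c := mc + 1
    let node_r := node.1
    let node_c := node.2
    let loop_upper_bound := (PySem.List.pyRange 0 node_r 1).any (fun r => loop.contains (r, node_c))
    if !loop_upper_bound then false else
    let loop_lower_bound := (PySem.List.pyRange node_r max_r 1).any (fun r => loop.contains (r, node_c))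
    if !loop_lower_bound then false else
    let loop_left_bound := (PySem.List.pyRange 0 node_c 1).any (fun c => loop.contains (node_r, c))
    if !loop_left_bound then false else
    (PySem.List.pyRange node_c max_c 1).any (fun c => loop.contains (node_r, c))
  | _, _ => false       -- empty loop: Python's max() raises ValueError; excluded by Pre_

-- ===== PORT B =====
def node_in_loop_alt (node : Int × Int) (loop : List (Int × Int)) : Bool :=
  let node_r := node.1
  let node_c := node.2
  let s := loop.foldl
    (fun (s : Bool × Bool × Bool × Bool) rc =>
      let r := rc.1
      let c := rc.2
      let upper := s.1 || (c == node_c && decide (0 ≤ r) && decide (r < node_r))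
      let lower := s.2.1 || (c == node_c && decide (r ≥ node_r))
      let left  := s.2.2.1 || (r == node_r && decide (0 ≤ c) && decide (c < node_c))
      let right := s.2.2.2 || (r == node_r && decide (c ≥ node_c))
      (upper, lower, left, right))
    (false, false, false, false)
  s.1 && s.2.1 && s.2.2.1 && s.2.2.2

-- ===== PRECONDITION & SPEC =====
-- Pre_ excludes only the empty loop, on which Python A raises ValueError (max() of empty sequence).
def Pre_node_in_loop (node : Int × Int) (loop : List (Int × Int)) : Prop := loop ≠ []
instance (node : Int × Int) (loop : List (Int × Int)) : Decidable (Pre_node_in_loop node loop) := by unfold Pre_node_in_loop; infer_instance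
def pvWitness_node_in_loop : (Int × Int) × (List (Int × Int)) := ((1, 1), [(0, 1), (2, 1), (1, 0), (1, 2)])

def Spec_node_in_loop (node : Int × Int) (loop : List (Int × Int)) (out : Bool) : Prop := out = node_in_loop_alt node loop
instance (node : Int × Int) (loop : List (Int × Int)) (out : Bool) : Decidable (Spec_node_in_loop node loop out) := by unfold Spec_node_in_loop; infer_instance

-- ===== CLAIM (what is proved, stated in full; the proofs are below) =====
def Claim_equal_node_in_loop : Prop := ∀ (node : Int × Int) (loop : List (Int × Int)), Dom_node_in_loop node loop → Pre_node_in_loop node loop → Spec_node_in_loop node loop (node_in_loop node loop)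

-- ===== LEMMAS AND PROOFS =====

-- B's fold accumulates four independent disjunctions.
theorem foldl_four_or (loop : List (Int × Int)) (p1 p2 p3 p4 : Int × Int → Bool)
    (a b c d : Bool) :
    loop.foldl (fun (s : Bool × Bool × Bool × Bool) rc =>
      (s.1 || p1 rc, s.2.1 || p2 rc, s.2.2.1 || p3 rc, s.2.2.2 || p4 rc)) (a, b, c, d)
    = (a || loop.any p1, b || loop.any p2, c || loop.any p3, d || loop.any p4) := by
  induction loop generalizing a b c d with
  | nil => simp
  | cons x t ih =>
    simp [List.foldl_cons, List.any_cons, ih, Bool.or_assoc]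

theorem any_range_contains (a b nc : Int) (loop : List (Int × Int)) :
    ((PySem.List.pyRange a b 1).any (fun r => loop.contains (r, nc)) = true)
    ↔ ∃ rc ∈ loop, rc.2 = nc ∧ a ≤ rc.1 ∧ rc.1 < b := by
  simp only [List.any_eq_true, PySem.List.mem_pyRange_one, List.contains_iff_mem]
  constructor
  · rintro ⟨r, ⟨h1, h2⟩, hm⟩
    exact ⟨(r, nc), hm, rfl, h1, h2⟩
  · rintro ⟨⟨r, c⟩, hm, hc, h1, h2⟩
    exact ⟨r, ⟨h1, h2⟩, hc ▸ hm⟩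

theorem any_range_contains' (a b nr : Int) (loop : List (Int × Int)) :
    ((PySem.List.pyRange a b 1).any (fun c => loop.contains (nr, c)) = true)
    ↔ ∃ rc ∈ loop, rc.1 = nr ∧ a ≤ rc.2 ∧ rc.2 < b := by
  simp only [List.any_eq_true, PySem.List.mem_pyRange_one, List.contains_iff_mem]
  constructor
  · rintro ⟨c, ⟨h1, h2⟩, hm⟩
    exact ⟨(nr, c), hm, rfl, h1, h2⟩
  · rintro ⟨⟨r, c⟩, hm, hr, h1, h2⟩
    exact ⟨c, ⟨h1, h2⟩, hr ▸ hm⟩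

theorem node_in_loop_spec : Claim_equal_node_in_loop := by
  intro node loop _ hpre
  unfold Spec_node_in_loop node_in_loop node_in_loop_alt
  have hne1 : loop.map Prod.fst ≠ [] := by simpa using hpre
  have hne2 : loop.map Prod.snd ≠ [] := by simpa using hpre
  obtain ⟨mr, hmr⟩ := Option.ne_none_iff_exists'.mp
    (fun h => hne1 (Iff.mp (PySem.List.max?_eq_none_iff _ (fun x : Int => x)) h))
  obtain ⟨mc, hmc⟩ := Option.ne_none_iff_exists'.mp
    (fun h => hne2 (Iff.mp (PySem.List.max?_eq_none_iff _ (fun x : Int => x)) h))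
  have hmaxr : ∀ rc ∈ loop, rc.1 ≤ mr := by
    intro rc h
    simpa using PySem.List.max?_isMax (key := fun x => x) hmr rc.1 (List.mem_map_of_mem (f := Prod.fst) h)
  have hmaxc : ∀ rc ∈ loop, rc.2 ≤ mc := by
    intro rc h
    simpa using PySem.List.max?_isMax (key := fun x => x) hmc rc.2 (List.mem_map_of_mem (f := Prod.snd) h)
  rw [hmr, hmc]
  simp only []
  rw [foldl_four_or]
  simp only [Bool.false_or]
  set nr := node.1
  set nc := node.2
  have hu : ((PySem.List.pyRange 0 nr 1).any (fun r => loop.contains (r, nc)))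
      = loop.any (fun rc => rc.2 == nc && decide (0 ≤ rc.1) && decide (rc.1 < nr)) := by
    rw [Bool.eq_iff_iff, any_range_contains]
    simp only [List.any_eq_true, Bool.and_eq_true, beq_iff_eq, decide_eq_true_eq]
    constructor
    · rintro ⟨rc, hm, h1, h2, h3⟩; exact ⟨rc, hm, ⟨h1, h2⟩, h3⟩
    · rintro ⟨rc, hm, ⟨h1, h2⟩, h3⟩; exact ⟨rc, hm, h1, h2, h3⟩
  have hl : ((PySem.List.pyRange nr (mr + 1) 1).any (fun r => loop.contains (r, nc)))
      = loop.any (fun rc => rc.2 == nc && decide (rc.1 ≥ nr)) := by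
    rw [Bool.eq_iff_iff, any_range_contains]
    simp only [List.any_eq_true, Bool.and_eq_true, beq_iff_eq, decide_eq_true_eq, ge_iff_le]
    constructor
    · rintro ⟨rc, hm, h1, h2, _⟩; exact ⟨rc, hm, h1, h2⟩
    · rintro ⟨rc, hm, h1, h2⟩; exact ⟨rc, hm, h1, h2, by have := hmaxr rc hm; omega⟩
  have hle : ((PySem.List.pyRange 0 nc 1).any (fun c => loop.contains (nr, c)))
      = loop.any (fun rc => rc.1 == nr && decide (0 ≤ rc.2) && decide (rc.2 < nc)) := by
    rw [Bool.eq_iff_iff, any_range_contains']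
    simp only [List.any_eq_true, Bool.and_eq_true, beq_iff_eq, decide_eq_true_eq]
    constructor
    · rintro ⟨rc, hm, h1, h2, h3⟩; exact ⟨rc, hm, ⟨h1, h2⟩, h3⟩
    · rintro ⟨rc, hm, ⟨h1, h2⟩, h3⟩; exact ⟨rc, hm, h1, h2, h3⟩
  have hri : ((PySem.List.pyRange nc (mc + 1) 1).any (fun c => loop.contains (nr, c)))
      = loop.any (fun rc => rc.1 == nr && decide (rc.2 ≥ nc)) := by
    rw [Bool.eq_iff_iff, any_range_contains']
    simp only [List.any_eq_true, Bool.and_eq_true, beq_iff_eq, decide_eq_true_eq, ge_iff_le]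
    constructor
    · rintro ⟨rc, hm, h1, h2, _⟩; exact ⟨rc, hm, h1, h2⟩
    · rintro ⟨rc, hm, h1, h2⟩; exact ⟨rc, hm, h1, h2, by have := hmaxc rc hm; omega⟩
  rw [hu, hl, hle, hri]
  cases loop.any (fun rc => rc.2 == nc && decide (0 ≤ rc.1) && decide (rc.1 < nr)) <;>
  cases loop.any (fun rc => rc.2 == nc && decide (rc.1 ≥ nr)) <;>
  cases loop.any (fun rc => rc.1 == nr && decide (0 ≤ rc.2) && decide (rc.2 < nc)) <;>
  simp
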